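-- pv_equiv track=rewrite | github.com/Tsedao/LaTee | utils/llm_utils.py | categorize_paths
-- ===== SOURCE A (Python) =====
-- def categorize_paths(paths):
--     tree = {}
--     terminating_paths = []
--     non_terminating_paths = []
--
--     # Build the tree from paths
--     for path in paths:
--         current = tree
--         for node in path:
--             if node not in current:
--                 current[node] = {}
--             current = current[node]
--
--     # Function to determine if a node is a terminating node
--     def is_terminating(node):
--         return len(node) == 0
--
--     # Find paths leading to terminating and non-terminating nodes
--     def find_paths(current, path):
--         # Check if current node is terminating
--         if is_terminating(current):
--             terminating_paths.append(path)
--         else: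
--             non_terminating_paths.append(path)
--
--         for node in current:
--             find_paths(current[node], path + [node])
--
--     # Start from the root node(s), should be handled dynamically
--     for root in tree:
--         find_paths(tree[root], [root])
--
--     return terminating_paths, non_terminating_paths
-- ===== SOURCE B (Python) =====
-- def categorize_paths(paths):
--     tree = {}
--     for path in paths:
--         current = tree
--         for node in path:
--             current = current.setdefault(node, {})
--
--     terminating_paths = []
--     non_terminating_paths = []
--
--     # Iterative DFS with an explicit stack (top = end of list); children are
--     # pushed in reversed insertion order so they pop in original order.
--     stack = [(tree[root], [root]) for root in reversed(tree)]
--     while stack: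
--         node, path = stack.pop()
--         if node:
--             non_terminating_paths.append(path)
--             for child in reversed(node):
--                 stack.append((node[child], path + [child]))
--         else:
--             terminating_paths.append(path)
--
--     return terminating_paths, non_terminating_paths
-- ===== Notes on version B (the rewrite author's own statement) =====
-- stated objective: alternative
-- what changed: The recursive find_paths with two shared accumulator lists is replaced by an iterative DFS over an explicit stack of (node, path) pairs, pushing children in reversed insertion order so the original preorder is reproduced.
import Mathlib
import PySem

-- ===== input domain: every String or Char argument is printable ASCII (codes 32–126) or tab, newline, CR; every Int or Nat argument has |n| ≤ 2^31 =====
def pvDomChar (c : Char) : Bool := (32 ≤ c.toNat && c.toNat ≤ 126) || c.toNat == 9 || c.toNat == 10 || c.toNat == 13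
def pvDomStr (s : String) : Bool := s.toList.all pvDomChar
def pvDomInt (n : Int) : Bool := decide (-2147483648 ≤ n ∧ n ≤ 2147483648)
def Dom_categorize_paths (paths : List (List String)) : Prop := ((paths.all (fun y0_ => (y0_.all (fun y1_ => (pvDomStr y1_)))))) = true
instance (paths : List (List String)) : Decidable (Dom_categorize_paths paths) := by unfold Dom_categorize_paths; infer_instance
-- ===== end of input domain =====

-- B replaces A's recursive find_paths with an iterative DFS over an explicit stack
-- (same preorder, same output); objective: alternative decomposition, same cost.

-- The nested Python dict 'tree' (a trie with insertion-ordered keys) as a mutual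
-- inductive: a Trie node carries its children as an insertion-ordered assoc list.
mutual
inductive Trie where
  | mk : TrieAL → Trie
deriving Repr
inductive TrieAL where
  | nil : TrieAL
  | cons : String → Trie → TrieAL → TrieAL
deriving Repr
end

mutual
def Trie.size : Trie → Nat
  | .mk al => 1 + al.size
def TrieAL.size : TrieAL → Nat
  | .nil => 0
  | .cons _ t rest => 1 + t.size + rest.size
end

def TrieAL.isEmpty : TrieAL → Bool
  | .nil => true
  | .cons _ _ _ => false

-- ===== PORT A =====
-- the inner 'for node in path' loop of the tree-building pass:
-- 'if node not in current: current[node] = {}; current = current[node]'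
mutual
def insertPath : List String → TrieAL → TrieAL
  | [], al => al
  | n :: rest, al => insertAL n rest al
  termination_by p al => (p.length, al.size + 1)
  decreasing_by apply Prod.Lex.right; omega
def insertAL : String → List String → TrieAL → TrieAL
  | n, rest, .nil => .cons n (.mk (insertPath rest .nil)) .nil
  | n, rest, .cons m t tail =>
      if m = n then
        match t with
        | .mk al => .cons m (.mk (insertPath rest al)) tail
      else .cons m t (insertAL n rest tail)
  termination_by _ rest al => (rest.length + 1, al.size)
  decreasing_by
    all_goals first
      | (apply Prod.Lex.left; omega)
      | (apply Prod.Lex.right; simp [TrieAL.size])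
end

def buildTrie (paths : List (List String)) : TrieAL :=
  paths.foldl (fun tree path => insertPath path tree) .nil

def pappend (a b : List (List String) × List (List String)) :
    List (List String) × List (List String) :=
  (a.1 ++ b.1, a.2 ++ b.2)

-- A's recursive find_paths: classify the node, then recurse over the children;
-- the two global accumulator lists become the concatenated pair result.
mutual
def findA : Trie → List String → List (List String) × List (List String)
  | .mk al, path =>
      pappend (if al.isEmpty then ([path], []) else ([], [path])) (findAList al path)
def findAList : TrieAL → List String → List (List String) × List (List String)
  | .nil, _ => ([], [])
  | .cons n t rest, path => pappend (findA t (path ++ [n])) (findAList rest path)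
end

-- 'for root in tree: find_paths(tree[root], [root])' = findAList over the roots with path []
def categorize_paths (paths : List (List String)) : List (List String) × List (List String) :=
  findAList (buildTrie paths) []

-- ===== PORT B =====
-- B builds the same tree (setdefault = the same insert), then runs an explicit
-- stack; head of the list = top of the stack, so pushing the children in
-- insertion order at the front = Python's reversed pushes at the end.
def childStack : TrieAL → List String → List (Trie × List String)
  | .nil, _ => []
  | .cons n t rest, path => (t, path ++ [n]) :: childStack rest path

theorem childStack_size_le : ∀ (al : TrieAL) (path : List String),
    ((childStack al path).map (fun x => x.1.size)).sum ≤ al.size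
  | .nil, _ => by simp [childStack, TrieAL.size]
  | .cons n t rest, path => by
      simp only [childStack, TrieAL.size, List.map_cons, List.sum_cons]
      have := childStack_size_le rest path
      omega

def loopB : List (Trie × List String) → List (List String) × List (List String) →
    List (List String) × List (List String)
  | [], acc => acc
  | (Trie.mk al, path) :: rest, (term, nont) =>
      if al.isEmpty then
        loopB rest (term ++ [path], nont)
      else
        loopB (childStack al path ++ rest) (term, nont ++ [path])
termination_by stack _ => (stack.map (fun x => x.1.size)).sum
decreasing_by
  · simp [Trie.size]
  · simp only [List.map_cons, List.sum_cons, List.map_append, List.sum_append]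
    have := childStack_size_le al path
    simp only [Trie.size]
    omega

def categorize_paths_alt (paths : List (List String)) :
    List (List String) × List (List String) :=
  loopB (childStack (buildTrie paths) []) ([], [])

-- ===== PRECONDITION & SPEC =====
def Spec_categorize_paths (paths : List (List String)) (out : List (List String) × List (List String)) : Prop := out = categorize_paths_alt paths
instance (paths : List (List String)) (out : List (List String) × List (List String)) : Decidable (Spec_categorize_paths paths out) := by unfold Spec_categorize_paths; infer_instance

-- ===== CLAIM (what is proved, stated in full; the proofs are below) =====
def Claim_equal_categorize_paths : Prop := ∀ (paths : List (List String)), Dom_categorize_paths paths → Spec_categorize_paths paths (categorize_paths paths)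

-- ===== LEMMAS AND PROOFS =====

-- total contribution of a stack's entries under A's recursive traversal
def F : List (Trie × List String) → List (List String) × List (List String)
  | [] => ([], [])
  | (t, p) :: rest => pappend (findA t p) (F rest)

theorem pappend_assoc (a b c : List (List String) × List (List String)) :
    pappend (pappend a b) c = pappend a (pappend b c) := by
  simp [pappend]

theorem pappend_nil (a : List (List String) × List (List String)) :
    pappend a ([], []) = a := by
  simp [pappend]

theorem F_append : ∀ (xs ys : List (Trie × List String)),
    F (xs ++ ys) = pappend (F xs) (F ys)
  | [], ys => by simp [F, pappend]
  | (t, p) :: xs, ys => by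
      simp only [List.cons_append, F, F_append xs ys, pappend_assoc]

theorem findAList_eq_F : ∀ (al : TrieAL) (path : List String),
    findAList al path = F (childStack al path)
  | .nil, _ => by simp [findAList, childStack, F]
  | .cons n t rest, path => by
      simp only [findAList, childStack, F, findAList_eq_F rest path]

theorem isEmpty_true_iff (al : TrieAL) : al.isEmpty = true ↔ al = .nil := by
  cases al <;> simp [TrieAL.isEmpty]

theorem loopB_eq_F : ∀ (stack : List (Trie × List String))
    (acc : List (List String) × List (List String)),
    loopB stack acc = pappend acc (F stack) := by
  intro stack acc
  induction stack, acc using loopB.induct with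
  | case1 acc => simp [loopB, F, pappend_nil]
  | case2 al path rest term nont hemp ih =>
      rw [isEmpty_true_iff] at hemp
      subst hemp
      simp only [loopB, TrieAL.isEmpty, if_true, ih]
      simp [F, findA, findAList, TrieAL.isEmpty, pappend]
  | case3 al path rest term nont hemp ih =>
      simp only [loopB, F]
      rw [if_neg (by simp only [hemp]; exact Bool.false_ne_true), ih, F_append]
      simp only [findA, findAList_eq_F]
      rw [if_neg (by simp only [hemp]; exact Bool.false_ne_true)]
      simp [pappend]

-- ===== VERDICT (by name: the statement is the Claim_ definition above) =====
theorem categorize_paths_spec : Claim_equal_categorize_paths := by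
  intro paths _
  unfold Spec_categorize_paths categorize_paths categorize_paths_alt
  rw [loopB_eq_F, findAList_eq_F]
  simp [pappend]
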